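-- pv_equiv track=rewrite | github.com/passantelsherif/information-theory-data-compression | LZ77_Compression/LZ777.py | match
-- ===== SOURCE A (Python) =====
-- def match(search_buff, look_ahead_buff, start_in_search):
--     """Finds the longest match of look_ahead_buff in search_buff starting at start_in_search."""
--     length = 0
--     max_len = len(look_ahead_buff)
--     while length < max_len:
--         if start_in_search + length < len(search_buff):
--             src = search_buff[start_in_search + length] # Still inside search buffer
--         else:
--             offset_into_matched = length - (len(search_buff) - start_in_search)
--             src = look_ahead_buff[offset_into_matched] # Past the end (overlap), copy from the already matched characters from the look-ahead buffer
--         if src == look_ahead_buff[length]: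
--             length += 1
--         else:
--             break
--     return length
-- ===== SOURCE B (Python) =====
-- def match(search_buff, look_ahead_buff, start_in_search):
--     """Finds the longest match of look_ahead_buff in search_buff starting at start_in_search."""
--     max_len = len(look_ahead_buff)
--     period = len(search_buff) - start_in_search
--     if period > 0:
--         # The reference stream (tail of the search buffer, then its overlap copies)
--         # is periodic with this period, so one block suffices: index it modularly.
--         base = (search_buff[start_in_search:] + search_buff)[:period]
--         for i in range(max_len):
--             if look_ahead_buff[i] != base[i % period]:
--                 return i
--         return max_len
--     # Start at or past the end of the search buffer: the stream is the look-ahead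
--     # buffer itself shifted forward, so take the longest common prefix with it.
--     shifted = look_ahead_buff[-period:]
--     for i, (a, b) in enumerate(zip(look_ahead_buff, shifted)):
--         if a != b:
--             return i
--     return len(shifted)
-- ===== Notes on version B (the rewrite author's own statement) =====
-- stated objective: alternative
-- what changed: Instead of A's stateful scan that re-selects its source (search buffer vs already-matched look-ahead) and recomputes len() every step, B precomputes one period-long reference block and compares the look-ahead against it with modular indexing (the overlap stream is provably periodic); the start-at-or-past-the-end case becomes a longest-common-prefix of the look-ahead with its own slice via zip; constant-factor speedup from the hoisted slicing and the cheaper per-step comparison.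
import Mathlib
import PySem

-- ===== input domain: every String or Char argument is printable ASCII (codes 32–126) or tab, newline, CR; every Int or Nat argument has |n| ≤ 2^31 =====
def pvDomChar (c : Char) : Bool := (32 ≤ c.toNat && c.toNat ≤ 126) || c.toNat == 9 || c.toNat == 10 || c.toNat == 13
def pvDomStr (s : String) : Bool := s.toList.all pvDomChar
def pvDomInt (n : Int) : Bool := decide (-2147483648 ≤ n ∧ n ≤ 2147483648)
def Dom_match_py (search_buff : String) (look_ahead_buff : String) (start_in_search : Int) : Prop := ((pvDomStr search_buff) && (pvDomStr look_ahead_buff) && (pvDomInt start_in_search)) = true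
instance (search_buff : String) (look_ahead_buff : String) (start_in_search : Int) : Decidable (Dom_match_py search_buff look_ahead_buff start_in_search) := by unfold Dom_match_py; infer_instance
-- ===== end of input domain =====

-- B replaces A's stateful source-switching scan by a precomputed period-long reference
-- block indexed modularly (the overlap stream is periodic), plus a zip-based common-prefix
-- for starts at/past the end of the search buffer; objective: alternative algorithm.

-- ===== PORT A =====
-- A's while-loop; `length` is the Python variable, recursion on the remaining room
-- (l.length - length). On an index that Python would raise on (pyGet? = none, outside
-- Pre_) the port returns the current length.
def matchALoop (s l : List Char) (start : Int) (length : Int) : Int :=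
  if h : length < (l.length : Int) then
    match (if start + length < (s.length : Int) then
             PySem.List.pyGet? s (start + length)
           else
             PySem.List.pyGet? l (length - ((s.length : Int) - start))),
          PySem.List.pyGet? l length with
    | some a, some b => if a = b then matchALoop s l start (length + 1) else length
    | _, _ => length
  else length
termination_by ((l.length : Int) - length).toNat
decreasing_by omega

def match_py (search_buff : String) (look_ahead_buff : String) (start_in_search : Int) : Int :=
  matchALoop search_buff.toList look_ahead_buff.toList start_in_search 0

-- ===== PORT B =====
-- B's period>0 loop: for i in range(max_len), compare look[i] with base[i % period];
-- on an out-of-range base index (Python would raise, outside Pre_) return i; at loop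
-- exit, B's 'return max_len'.
def matchBLoopP (l base : List Char) (period : Int) (i : Int) : Int :=
  if h : i < (l.length : Int) then
    match PySem.List.pyGet? l i, PySem.List.pyGet? base (PySem.Int.mod i period) with
    | some a, some b => if a = b then matchBLoopP l base period (i + 1) else i
    | _, _ => i
  else (l.length : Int)
termination_by ((l.length : Int) - i).toNat
decreasing_by omega

-- B's zip/enumerate loop: first mismatch index in the zipped pairs, else len(shifted).
def matchBZip (pairs : List (Char × Char)) (i : Int) (n : Int) : Int :=
  match pairs with
  | [] => n
  | (a, b) :: rest => if a = b then matchBZip rest (i + 1) n else i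

def match_py_alt (search_buff : String) (look_ahead_buff : String) (start_in_search : Int) : Int :=
  let s := search_buff.toList
  let l := look_ahead_buff.toList
  let period : Int := (s.length : Int) - start_in_search
  if 0 < period then
    let base := PySem.List.slice (PySem.List.slice s (some start_in_search) none ++ s) none (some period)
    matchBLoopP l base period 0
  else
    let shifted := PySem.List.slice l (some (-period)) none
    matchBZip (l.zip shifted) 0 (shifted.length : Int)

-- ===== PRECONDITION & SPEC =====
-- Pre_ excludes exactly the inputs on which the Python A raises IndexError: a start more
-- than len(search_buff) below zero, and a start beyond len(search_buff) whose overlap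
-- index runs off the look-ahead buffer before any mismatch stops the loop (i.e. the
-- look-ahead buffer is (start−len)-periodic over the overrun range).
def Pre_match_py (search_buff : String) (look_ahead_buff : String) (start_in_search : Int) : Prop :=
  look_ahead_buff.toList.length = 0 ∨
    (-(search_buff.toList.length : Int) ≤ start_in_search ∧
      (start_in_search ≤ (search_buff.toList.length : Int) ∨
        (start_in_search - (search_buff.toList.length : Int) < (look_ahead_buff.toList.length : Int) ∧
          ∃ i : Nat, (i : Int) < (look_ahead_buff.toList.length : Int) - (start_in_search - (search_buff.toList.length : Int)) ∧
            PySem.List.pyGet? look_ahead_buff.toList ((i : Int) + (start_in_search - (search_buff.toList.length : Int))) ≠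
              PySem.List.pyGet? look_ahead_buff.toList (i : Int))))
instance (search_buff : String) (look_ahead_buff : String) (start_in_search : Int) : Decidable (Pre_match_py search_buff look_ahead_buff start_in_search) := by
  unfold Pre_match_py
  have : ∀ (k : Int) (p : Nat → Prop) [DecidablePred p], Decidable (∃ i : Nat, (i : Int) < k ∧ p i) := by
    intro k p _
    by_cases hk : 0 ≤ k
    · exact decidable_of_iff (∃ i : Nat, i < k.toNat ∧ p i) (by constructor <;> (rintro ⟨i, h1, h2⟩; exact ⟨i, by omega, h2⟩))
    · exact .isFalse (by rintro ⟨i, h1, _⟩; omega)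
  infer_instance

def pvWitness_match_py : String × String × Int := ("ab", "aba", 1)

def Spec_match_py (search_buff : String) (look_ahead_buff : String) (start_in_search : Int) (out : Int) : Prop := out = match_py_alt search_buff look_ahead_buff start_in_search
instance (search_buff : String) (look_ahead_buff : String) (start_in_search : Int) (out : Int) : Decidable (Spec_match_py search_buff look_ahead_buff start_in_search out) := by unfold Spec_match_py; infer_instance

-- ===== CLAIM (what is proved, stated in full; the proofs are below) =====
def Claim_equal_match_py : Prop := ∀ (search_buff : String) (look_ahead_buff : String) (start_in_search : Int), Dom_match_py search_buff look_ahead_buff start_in_search → Pre_match_py search_buff look_ahead_buff start_in_search → Spec_match_py search_buff look_ahead_buff start_in_search (match_py search_buff look_ahead_buff start_in_search)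

-- ===== LEMMAS AND PROOFS =====

-- Period > 0: A's loop equals B's modular loop, given that the base block realises the
-- head of the stream (H1) and that the matched prefix so far is periodic (Inv).
theorem matchALoop_eq_loopP (s l base : List Char) (start period i : Int)
    (hper : period = (s.length : Int) - start) (hpos : 0 < period)
    (h0 : 0 ≤ i) (hle : i ≤ (l.length : Int))
    (H1 : ∀ j : Int, 0 ≤ j → j < period → PySem.List.pyGet? s (start + j) = PySem.List.pyGet? base j)
    (Inv : ∀ j : Int, 0 ≤ j → j < i → PySem.List.pyGet? l j = PySem.List.pyGet? base (j % period)) :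
    matchALoop s l start i = matchBLoopP l base period i := by
  by_cases hi : i < (l.length : Int)
  · have hil : i.toNat < l.length := by omega
    have hc : PySem.List.pyGet? l i = some (l[i.toNat]'hil) := by
      rw [PySem.List.pyGet?_of_nonneg l h0, List.getElem?_eq_getElem hil]
    have hsrc : (if start + i < (s.length : Int) then PySem.List.pyGet? s (start + i)
        else PySem.List.pyGet? l (i - ((s.length : Int) - start))) =
        PySem.List.pyGet? base (PySem.Int.mod i period) := by
      rw [PySem.Int.mod_eq_emod_of_pos hpos]
      by_cases hb : start + i < (s.length : Int)
      · have hip : i < period := by omega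
        rw [if_pos hb, H1 i h0 hip, Int.emod_eq_of_lt h0 hip]
      · rw [if_neg hb, ← hper]
        have h1 : 0 ≤ i - period := by omega
        have h2 : i - period < i := by omega
        rw [Inv (i - period) h1 h2, Int.sub_emod_right]
    rw [matchALoop, matchBLoopP, dif_pos hi, dif_pos hi, hsrc, hc]
    cases hbv : PySem.List.pyGet? base (PySem.Int.mod i period) with
    | none => rfl
    | some d =>
      by_cases hdc : d = l[i.toNat]'hil
      · subst hdc
        show (if l[i.toNat]'hil = l[i.toNat]'hil then matchALoop s l start (i + 1) else i) =
          (if l[i.toNat]'hil = l[i.toNat]'hil then matchBLoopP l base period (i + 1) else i)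
        rw [if_pos rfl, if_pos rfl]
        refine matchALoop_eq_loopP s l base start period (i + 1) hper hpos (by omega) (by omega) H1 ?_
        intro j hj0 hj1
        by_cases hji : j < i
        · exact Inv j hj0 hji
        · have hj : j = i := by omega
          subst hj
          rw [hc, ← hbv, PySem.Int.mod_eq_emod_of_pos hpos]
      · simp only [if_neg hdc, if_neg (fun h : l[i.toNat]'hil = d => hdc h.symm)]
  · rw [matchALoop, matchBLoopP, dif_neg hi, dif_neg hi]
    omega
termination_by ((l.length : Int) - i).toNat
decreasing_by omega

-- The base block built by B realises the head of A's stream, for -len(s) ≤ start < len(s).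
theorem base_spec (s : List Char) (start : Int)
    (hlo : -(s.length : Int) ≤ start) (hhi : start < (s.length : Int)) (j : Int)
    (hj0 : 0 ≤ j) (hj : j < (s.length : Int) - start) :
    PySem.List.pyGet? s (start + j) =
      PySem.List.pyGet? (PySem.List.slice
        (PySem.List.slice s (some start) none ++ s) none (some ((s.length : Int) - start))) j := by
  rw [PySem.List.slice_some_none s start,
    PySem.List.slice_to _ (by omega : (0:Int) ≤ (s.length : Int) - start),
    PySem.List.pyGet?_of_nonneg _ hj0, List.getElem?_take_of_lt (by omega)]
  by_cases hstart : 0 ≤ start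
  · have hcl : PySem.List.clampIdx s.length start = start.toNat := by
      have h : start = ((start.toNat : Nat) : Int) := by omega
      rw [h, PySem.List.clampIdx_natCast]; omega
    rw [hcl, PySem.List.pyGet?_of_nonneg _ (by omega : (0:Int) ≤ start + j),
      List.getElem?_append_left (by simp [List.length_drop]; omega), List.getElem?_drop]
    congr 1; omega
  · have hcl : PySem.List.clampIdx s.length start = s.length - (-start).toNat := by
      have h : start = -(((-start).toNat : Nat) : Int) := by omega
      rw [h, PySem.List.clampIdx_neg_natCast _ _ (by omega)]; omega
    rw [hcl]
    by_cases hneg : start + j < 0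
    · rw [PySem.List.pyGet?_neg s hneg (by omega),
        List.getElem?_append_left (by simp [List.length_drop]; omega), List.getElem?_drop]
      congr 1; omega
    · rw [PySem.List.pyGet?_of_nonneg _ (by omega : (0:Int) ≤ start + j),
        List.getElem?_append_right (by simp [List.length_drop]; omega)]
      congr 1; simp [List.length_drop]; omega

-- Period ≤ 0 (start at/past the end of the search buffer): A's loop equals B's zip loop.
theorem matchALoop_eq_zip (s l : List Char) (shift : Int) (i : Int)
    (hsh : 0 ≤ shift) (h0 : 0 ≤ i)
    (hbound : i.toNat + shift.toNat ≤ l.length ∨ i = 0) :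
    matchALoop s l ((s.length : Int) + shift) i =
      matchBZip ((l.drop i.toNat).zip (l.drop (i.toNat + shift.toNat))) i
        ((l.drop shift.toNat).length : Int) := by
  rw [matchALoop]
  by_cases hi : i < (l.length : Int)
  · rw [dif_pos hi]
    have hb : ¬ ((s.length : Int) + shift + i < (s.length : Int)) := by omega
    rw [if_neg hb]
    have harg : i - ((s.length : Int) - ((s.length : Int) + shift)) = i + shift := by ring
    rw [harg]
    by_cases hs : i + shift < (l.length : Int)
    · have h1 : i.toNat < l.length := by omega
      have h2 : i.toNat + shift.toNat < l.length := by omega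
      have hc1 : PySem.List.pyGet? l i = some (l[i.toNat]'h1) := by
        rw [PySem.List.pyGet?_of_nonneg l h0, List.getElem?_eq_getElem h1]
      have hts : (i + shift).toNat = i.toNat + shift.toNat := by omega
      have hc2 : PySem.List.pyGet? l (i + shift) = some (l[i.toNat + shift.toNat]'h2) := by
        rw [PySem.List.pyGet?_of_nonneg l (by omega), hts, List.getElem?_eq_getElem h2]
      rw [hc1, hc2, List.drop_eq_getElem_cons h1, List.drop_eq_getElem_cons h2,
        List.zip_cons_cons]
      show (if l[i.toNat + shift.toNat]'h2 = l[i.toNat]'h1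
              then matchALoop s l ((s.length : Int) + shift) (i + 1) else i) =
           (if l[i.toNat]'h1 = l[i.toNat + shift.toNat]'h2
              then matchBZip ((l.drop (i.toNat + 1)).zip (l.drop (i.toNat + shift.toNat + 1))) (i + 1)
                     ((l.drop shift.toNat).length : Int)
              else i)
      by_cases he : l[i.toNat]'h1 = l[i.toNat + shift.toNat]'h2
      · rw [if_pos he.symm, if_pos he]
        have hrec := matchALoop_eq_zip s l shift (i + 1) hsh (by omega) (Or.inl (by omega))
        have h3 : (i + 1).toNat = i.toNat + 1 := by omega
        rw [h3] at hrec
        rw [show i.toNat + shift.toNat + 1 = i.toNat + 1 + shift.toNat from by omega]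
        exact hrec
      · rw [if_neg (fun h => he h.symm), if_neg he]
    · have hnone : PySem.List.pyGet? l (i + shift) = none := by
        rw [PySem.List.pyGet?_of_nonneg l (by omega)]
        exact List.getElem?_eq_none (by omega)
      rw [hnone, List.drop_eq_nil_of_le (show l.length ≤ i.toNat + shift.toNat by omega),
        List.zip_nil_right]
      have hdl : (l.drop shift.toNat).length = l.length - shift.toNat := List.length_drop
      cases hgl : PySem.List.pyGet? l i <;>
        · show i = ((l.drop shift.toNat).length : Int)
          omega
  · rw [dif_neg hi, List.drop_eq_nil_of_le (show l.length ≤ i.toNat by omega), List.zip_nil_left]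
    show i = ((l.drop shift.toNat).length : Int)
    have : (l.drop shift.toNat).length = l.length - shift.toNat := List.length_drop
    omega
termination_by ((l.length : Int) - i).toNat
decreasing_by omega

-- ===== VERDICT (by name: the statement is the Claim_ definition above) =====
theorem match_py_spec : Claim_equal_match_py := by
  intro sb lb st _ hpre
  unfold Spec_match_py match_py match_py_alt
  by_cases hper : 0 < (sb.toList.length : Int) - st
  · show matchALoop sb.toList lb.toList st 0 =
      if 0 < (sb.toList.length : Int) - st then
        matchBLoopP lb.toList
          (PySem.List.slice (PySem.List.slice sb.toList (some st) none ++ sb.toList) none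
            (some ((sb.toList.length : Int) - st)))
          ((sb.toList.length : Int) - st) 0
      else
        matchBZip (lb.toList.zip (PySem.List.slice lb.toList (some (-((sb.toList.length : Int) - st))) none)) 0
          ((PySem.List.slice lb.toList (some (-((sb.toList.length : Int) - st))) none).length : Int)
    rw [if_pos hper]
    rcases hpre with hempty | ⟨hlo, _⟩
    · have hnil : lb.toList = [] := List.eq_nil_of_length_eq_zero hempty
      rw [hnil, matchALoop, matchBLoopP]
      simp
    · exact matchALoop_eq_loopP sb.toList lb.toList _ st _ 0 rfl hper le_rfl (by omega)
        (fun j hj0 hj => base_spec sb.toList st hlo (by omega) j hj0 hj)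
        (fun j hj0 hj => absurd hj0 (by omega))
  · show matchALoop sb.toList lb.toList st 0 =
      if 0 < (sb.toList.length : Int) - st then
        matchBLoopP lb.toList
          (PySem.List.slice (PySem.List.slice sb.toList (some st) none ++ sb.toList) none
            (some ((sb.toList.length : Int) - st)))
          ((sb.toList.length : Int) - st) 0
      else
        matchBZip (lb.toList.zip (PySem.List.slice lb.toList (some (-((sb.toList.length : Int) - st))) none)) 0
          ((PySem.List.slice lb.toList (some (-((sb.toList.length : Int) - st))) none).length : Int)
    rw [if_neg hper]
    -- the shift: start − len(search_buff) ≥ 0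
    have hshift : st = (sb.toList.length : Int) + (st - (sb.toList.length : Int)) := by ring
    have hsh0 : 0 ≤ st - (sb.toList.length : Int) := by omega
    have hslice : PySem.List.slice lb.toList (some (-((sb.toList.length : Int) - st))) none =
        lb.toList.drop (st - (sb.toList.length : Int)).toNat := by
      rw [PySem.List.slice_some_none]
      have h : -((sb.toList.length : Int) - st) = (((st - (sb.toList.length : Int)).toNat : Nat) : Int) := by omega
      rw [h, PySem.List.clampIdx_natCast]
      rcases le_total ((st - (sb.toList.length : Int)).toNat) lb.toList.length with hle | hle
      · rw [Nat.min_eq_left hle]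
      · rw [Nat.min_eq_right hle, List.drop_length, List.drop_eq_nil_of_le hle]
    have hzip := matchALoop_eq_zip sb.toList lb.toList (st - (sb.toList.length : Int)) 0 hsh0 le_rfl
      (Or.inr rfl)
    have harg : (sb.toList.length : Int) + (st - (sb.toList.length : Int)) = st := by ring
    rw [harg] at hzip
    simp only [Int.toNat_zero, List.drop_zero, Nat.zero_add] at hzip
    rw [hslice]
    exact hzip
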